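-- pv_equiv track=rewrite | github.com/ploffy06/rosalind | LCSM_finding_a_shared_motif.py | getSubstringsOfLength
-- ===== SOURCE A (Python) =====
-- def getSubstringsOfLength(dna_string1, dna_string2, length):
--     substrings = []
--     len1 = len(dna_string1)
--     len2 = len(dna_string2)
--
--     for i in range(len1):
--         for j in range(len2):
--             k = 0
--             while (i + k < len1 and j + k < len2 and dna_string1[i + k] == dna_string2[j + k]):
--                 k += 1
--             if k == length:
--                 substrings.append(dna_string1[i:i + k])
--     return substrings
-- ===== SOURCE B (Python) =====
-- def getSubstringsOfLength(dna_string1, dna_string2, length):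
--     # Dynamic programming: lce[i][j] = length of longest common extension of
--     # dna_string1[i:] and dna_string2[j:], computed bottom-up in O(n*m),
--     # instead of re-extending each pair (i, j) character by character.
--     n = len(dna_string1)
--     m = len(dna_string2)
--     rows = [None] * n
--     nxt = [0] * (m + 1)
--     for i in range(n - 1, -1, -1):
--         cur = [0] * (m + 1)
--         c = dna_string1[i]
--         for j in range(m - 1, -1, -1):
--             if c == dna_string2[j]:
--                 cur[j] = nxt[j + 1] + 1
--         rows[i] = cur
--         nxt = cur
--     out = []
--     for i in range(n):
--         row = rows[i]
--         for j in range(m):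
--             if row[j] == length:
--                 out.append(dna_string1[i:i + length])
--     return out
-- ===== Notes on version B (the rewrite author's own statement) =====
-- stated objective: faster
-- what changed: Replaces the per-pair character-by-character while-loop extension with a bottom-up O(n*m) dynamic-programming table lce[i][j] = lce[i+1][j+1]+1 on match, then a single scan collecting pairs whose table entry equals length.
import Mathlib
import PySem

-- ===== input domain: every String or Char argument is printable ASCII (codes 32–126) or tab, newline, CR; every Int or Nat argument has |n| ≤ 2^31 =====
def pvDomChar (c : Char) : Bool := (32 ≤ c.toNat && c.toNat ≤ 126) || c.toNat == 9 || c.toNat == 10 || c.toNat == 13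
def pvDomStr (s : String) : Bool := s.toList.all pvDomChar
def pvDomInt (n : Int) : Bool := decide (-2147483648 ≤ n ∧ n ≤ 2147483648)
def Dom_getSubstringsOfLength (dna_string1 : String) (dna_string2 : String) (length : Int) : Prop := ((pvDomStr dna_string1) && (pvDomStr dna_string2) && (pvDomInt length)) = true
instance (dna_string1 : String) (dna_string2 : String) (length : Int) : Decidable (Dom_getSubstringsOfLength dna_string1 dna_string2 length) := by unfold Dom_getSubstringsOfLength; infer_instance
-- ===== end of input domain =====

-- B replaces A's per-pair while-loop extension by an O(n*m) dynamic-programming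
-- table of longest common extensions (objective: faster, asymptotic).

-- ===== PORT A =====
-- the inner `while` of A: extends k while chars at i+k / j+k exist and match
def whileK (l1 l2 : List Char) (i j k : Nat) : Nat :=
  if h : i + k < l1.length ∧ j + k < l2.length ∧ l1.getD (i + k) 'a' = l2.getD (j + k) 'a' then
    whileK l1 l2 i j (k + 1)
  else k
termination_by l1.length - (i + k)
decreasing_by obtain ⟨h1, -, -⟩ := h; omega

def getSubstringsOfLength (dna_string1 : String) (dna_string2 : String) (length : Int) : List String :=
  let l1 := dna_string1.toList
  let l2 := dna_string2.toList
  (List.range l1.length).foldl (fun acc i =>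
    (List.range l2.length).foldl (fun acc j =>
      let k := whileK l1 l2 i j 0
      if (k : Int) = length then
        acc ++ [String.ofList (PySem.List.slice l1 (some (i : Int)) (some ((i + k : Nat) : Int)))]
      else acc) acc) []

-- ===== PORT B =====
-- one DP row: cur[j] = nxt[j+1] + 1 if chars match else 0, with trailing cur[m] = 0
def lceBuildRow (c : Char) : List Char → List Nat → List Nat
  | [], _ => [0]
  | b :: bs, nxt => (if c = b then nxt.tail.headD 0 + 1 else 0) :: lceBuildRow c bs nxt.tail

-- rows built bottom-up (Source B's descending i-loop), starting from the all-zero row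
def lceRows : List Char → List Char → List (List Nat)
  | [], _ => []
  | a :: as, l2 =>
      let rest := lceRows as l2
      lceBuildRow a l2 (rest.headD (List.replicate (l2.length + 1) 0)) :: rest

def getSubstringsOfLength_alt (dna_string1 : String) (dna_string2 : String) (length : Int) : List String :=
  let l1 := dna_string1.toList
  let l2 := dna_string2.toList
  let rows := lceRows l1 l2
  (List.range l1.length).foldl (fun acc i =>
    let row := rows.getD i []
    (List.range l2.length).foldl (fun acc j =>
      if ((row.getD j 0 : Nat) : Int) = length then
        acc ++ [String.ofList (PySem.List.slice l1 (some (i : Int)) (some ((i : Int) + length)))]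
      else acc) acc) []

-- ===== PRECONDITION & SPEC =====
def Spec_getSubstringsOfLength (dna_string1 : String) (dna_string2 : String) (length : Int) (out : List String) : Prop := out = getSubstringsOfLength_alt dna_string1 dna_string2 length
instance (dna_string1 : String) (dna_string2 : String) (length : Int) (out : List String) : Decidable (Spec_getSubstringsOfLength dna_string1 dna_string2 length out) := by unfold Spec_getSubstringsOfLength; infer_instance

-- ===== CLAIM (what is proved, stated in full; the proofs are below) =====
def Claim_equal_getSubstringsOfLength : Prop := ∀ (dna_string1 : String) (dna_string2 : String) (length : Int), Dom_getSubstringsOfLength dna_string1 dna_string2 length → Spec_getSubstringsOfLength dna_string1 dna_string2 length (getSubstringsOfLength dna_string1 dna_string2 length)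

-- ===== LEMMAS AND PROOFS =====

-- longest common extension (mathematical characterisation used by the proofs)
def lce : List Char → List Char → Nat
  | a :: as, b :: bs => if a = b then lce as bs + 1 else 0
  | _, _ => 0

theorem lce_nil_right (xs : List Char) : lce xs [] = 0 := by
  cases xs <;> rfl

theorem whileK_eq (l1 l2 : List Char) (i j k : Nat) :
    whileK l1 l2 i j k = k + lce (l1.drop (i + k)) (l2.drop (j + k)) := by
  fun_induction whileK l1 l2 i j k with
  | case1 k h ih =>
    obtain ⟨h1, h2, h3⟩ := h
    rw [List.getD_eq_getElem l1 'a' h1, List.getD_eq_getElem l2 'a' h2] at h3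
    rw [ih]
    rw [List.drop_eq_getElem_cons h1, List.drop_eq_getElem_cons h2]
    simp only [lce, if_pos h3]
    simp only [← Nat.add_assoc]
    omega
  | case2 k h =>
    push Not at h
    by_cases h1 : i + k < l1.length
    · by_cases h2 : j + k < l2.length
      · have hne := h h1 h2
        rw [List.getD_eq_getElem l1 'a' h1, List.getD_eq_getElem l2 'a' h2] at hne
        rw [List.drop_eq_getElem_cons h1, List.drop_eq_getElem_cons h2]
        simp only [lce, if_neg hne]
        omega
      · have hd : List.drop (j + k) l2 = [] := List.drop_eq_nil_of_le (by omega)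
        rw [hd, lce_nil_right]
        omega
    · have hd : List.drop (i + k) l1 = [] := List.drop_eq_nil_of_le (by omega)
      rw [hd]
      have hl : lce [] (List.drop (j + k) l2) = 0 := rfl
      omega

theorem tail_headD_eq_getD_one (xs : List Nat) : xs.tail.headD 0 = xs.getD 1 0 := by
  cases xs with
  | nil => rfl
  | cons x xs => cases xs <;> rfl

theorem getD_tail_nat (xs : List Nat) (j : Nat) : xs.tail.getD (j + 1) 0 = xs.getD (j + 2) 0 := by
  cases xs <;> simp [List.getD]

theorem buildRow_getD (c : Char) (l2 : List Char) (nxt : List Nat) (j : Nat) :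
    (lceBuildRow c l2 nxt).getD j 0 =
      if h : j < l2.length then (if c = l2[j] then nxt.getD (j + 1) 0 + 1 else 0) else 0 := by
  induction l2 generalizing nxt j with
  | nil =>
    rw [dif_neg (by simp)]
    cases j with
    | zero => rfl
    | succ j => simp [lceBuildRow, List.getD]
  | cons b bs ih =>
    cases j with
    | zero =>
      simp only [lceBuildRow, List.getD_cons_zero, List.length_cons, List.getElem_cons_zero,
        dif_pos (Nat.succ_pos bs.length)]
      rw [tail_headD_eq_getD_one]
      norm_num
    | succ j =>
      simp only [lceBuildRow, List.getD_cons_succ, List.length_cons, List.getElem_cons_succ]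
      rw [ih]
      by_cases hj : j < bs.length
      · rw [dif_pos hj, dif_pos (by omega)]
        rw [getD_tail_nat]
        norm_num
      · rw [dif_neg hj, dif_neg (by omega)]

theorem rows_head (l1 l2 : List Char) (j : Nat) (hj : j ≤ l2.length) :
    ((lceRows l1 l2).headD (List.replicate (l2.length + 1) 0)).getD j 0 = lce l1 (l2.drop j) := by
  induction l1 generalizing j with
  | nil =>
    have hl : lce [] (l2.drop j) = 0 := rfl
    rw [hl]
    simp only [lceRows, List.headD_nil]
    rw [List.getD_eq_getElem?_getD, List.getElem?_replicate]
    rw [if_pos (by omega)]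
    rfl
  | cons a as ih =>
    simp only [lceRows, List.headD_cons]
    rw [buildRow_getD]
    by_cases h : j < l2.length
    · rw [dif_pos h, List.drop_eq_getElem_cons h]
      simp only [lce]
      by_cases hc : a = l2[j]
      · rw [if_pos hc, if_pos hc, ih (j + 1) (by omega)]
      · rw [if_neg hc, if_neg hc]
    · rw [dif_neg h]
      have : j = l2.length := by omega
      subst this
      rw [List.drop_length, lce_nil_right]

theorem rows_getD (l1 l2 : List Char) (i j : Nat) (hi : i < l1.length) (hj : j ≤ l2.length) :
    ((lceRows l1 l2).getD i []).getD j 0 = lce (l1.drop i) (l2.drop j) := by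
  induction l1 generalizing i with
  | nil => simp at hi
  | cons a as ih =>
    cases i with
    | zero =>
      have := rows_head (a :: as) l2 j hj
      simpa only [lceRows, List.headD_cons, List.getD_cons_zero, List.drop_zero] using this
    | succ i =>
      simp only [lceRows, List.getD_cons_succ, List.drop_succ_cons]
      exact ih i (by simpa using hi)

theorem whileK_eq_rows (l1 l2 : List Char) (i j : Nat) (hi : i < l1.length) (hj : j < l2.length) :
    whileK l1 l2 i j 0 = ((lceRows l1 l2).getD i []).getD j 0 := by
  rw [whileK_eq, rows_getD l1 l2 i j hi (by omega)]
  simp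

-- ===== VERDICT (by name: the statement is the Claim_ definition above) =====
theorem getSubstringsOfLength_spec : Claim_equal_getSubstringsOfLength := by
  intro dna_string1 dna_string2 length _
  unfold Spec_getSubstringsOfLength getSubstringsOfLength getSubstringsOfLength_alt
  simp only []
  apply PySem.List.foldl_congr_mem
  intro acc i hi
  rw [List.mem_range] at hi
  apply PySem.List.foldl_congr_mem
  intro acc2 j hj
  rw [List.mem_range] at hj
  rw [whileK_eq_rows _ _ i j hi hj]
  by_cases hc : ((((lceRows dna_string1.toList dna_string2.toList).getD i []).getD j 0 : Nat) : Int) = length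
  · rw [if_pos hc, if_pos hc, ← hc]
    norm_cast
  · rw [if_neg hc, if_neg hc]
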